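-- pv_equiv track=rewrite | github.com/DenkMybu/AdventOfCode2024 | problem2/case2.py | count_with_remove
-- ===== SOURCE A (Python) =====
-- def check_order(line):
--     return all(line[i] < line[i + 1] for i in range(len(line) - 1)) or all(line[i] > line[i + 1] for i in range(len(line) - 1))
--
-- def check_diff(line):
--     return all(1 <= abs(line[i] - line[i + 1]) <= 3 for i in range(len(line) - 1))
--
-- def count_with_remove(line):
--     for i in range(len(line)):
--         removed_val = line.pop(i)
--         if check_order(line) and check_diff(line):
--             line.insert(i,removed_val)
--             return (True,i)
--         line.insert(i,removed_val)
--     return(False,None)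
-- ===== SOURCE B (Python) =====
-- def count_with_remove(line):
--     # O(n): per-pair up/down flags, suffix-chain tables, one left-to-right scan.
--     n = len(line)
--     up = [1 <= b - a <= 3 for a, b in zip(line, line[1:])]
--     dn = [1 <= a - b <= 3 for a, b in zip(line, line[1:])]
--     sufU = suffix_chain(up)   # sufU[k] iff line[k:] is an ascending chain
--     sufD = suffix_chain(dn)
--     preU = preD = True        # line[:i] is an ascending / descending chain
--     for i in range(n):
--         okU = preU and sufU[min(i + 1, n - 1)] and (
--             i == 0 or i == n - 1 or 1 <= line[i + 1] - line[i - 1] <= 3)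
--         okD = preD and sufD[min(i + 1, n - 1)] and (
--             i == 0 or i == n - 1 or 1 <= line[i - 1] - line[i + 1] <= 3)
--         if okU or okD:
--             return (True, i)
--         if i >= 1:
--             preU = preU and up[i - 1]
--             preD = preD and dn[i - 1]
--     return (False, None)
--
--
-- def suffix_chain(pairs):
--     # s[k] = all(pairs[k:]); length len(pairs)+1
--     s = [True]
--     for p in reversed(pairs):
--         s.append(s[-1] and p)
--     s.reverse()
--     return s
-- ===== Notes on version B (the rewrite author's own statement) =====
-- stated objective: faster
-- what changed: A pops each index and rescans the whole remaining list (O(n^2)); B precomputes per-pair up/down flags and suffix-chain validity tables once and tests every removal index in O(1) during a single left-to-right scan that carries the prefix-chain flags.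
import Mathlib
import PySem

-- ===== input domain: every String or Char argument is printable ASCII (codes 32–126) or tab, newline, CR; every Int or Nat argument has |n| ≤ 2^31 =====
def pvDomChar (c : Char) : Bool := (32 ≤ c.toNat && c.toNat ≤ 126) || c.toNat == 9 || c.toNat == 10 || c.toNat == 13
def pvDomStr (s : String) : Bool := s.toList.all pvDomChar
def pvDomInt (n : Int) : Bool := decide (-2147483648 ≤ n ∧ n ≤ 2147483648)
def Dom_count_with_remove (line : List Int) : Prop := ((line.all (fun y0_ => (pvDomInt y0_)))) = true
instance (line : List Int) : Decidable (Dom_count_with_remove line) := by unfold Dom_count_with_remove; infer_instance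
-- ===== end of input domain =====

-- B replaces A's try-every-removal rescan (O(n^2)) by per-pair up/down flags with
-- suffix-chain tables and a single scan testing each removal in O(1) (O(n)); objective: faster.
-- A temporarily pops/re-inserts elements of `line` but always restores it, so there is no
-- observable mutation; the ports are pure.

-- ===== PORT A =====
-- all(<p>(line[i], line[i+1]) for i in range(len(line) - 1))
def pyAllIdx (p : Int → Int → Bool) (l : List Int) : Bool :=
  (PySem.List.pyRange 0 ((l.length : Int) - 1) 1).all fun i =>
    p (PySem.List.pyGetD l i 0) (PySem.List.pyGetD l (i + 1) 0)
    -- indices i, i+1 are always in range here, so pyGetD is exact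

def check_order (l : List Int) : Bool :=
  pyAllIdx (fun a b => decide (a < b)) l || pyAllIdx (fun a b => decide (a > b)) l

def check_diff (l : List Int) : Bool :=
  pyAllIdx (fun a b => decide (1 ≤ |a - b| ∧ |a - b| ≤ 3)) l

-- the for-loop over range(len(line)); pop(i) never raises since i is in range
def cwrA_go (line : List Int) : List Int → Bool × Option Int
  | [] => (false, none)
  | i :: rest =>
    match PySem.List.pop? line i with
    | some (_, r) =>
        if check_order r && check_diff r then (true, some i) else cwrA_go line rest
    | none => cwrA_go line rest   -- unreachable: i ∈ range(len(line))

def count_with_remove (line : List Int) : Bool × Option Int :=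
  cwrA_go line (PySem.List.pyRange 0 (line.length : Int) 1)

-- ===== PORT B =====
-- suffix_chain(pairs): s with s[k] = all(pairs[k:]); a backward scan appending
-- s[-1] and p, then reversed in place
def suffix_chain (pairs : List Bool) : List Bool :=
  (pairs.reverse.foldl (fun s p => s ++ [PySem.List.pyGetD s (-1) true && p]) [true]).reverse

-- the for-loop over range(n) with running prefix flags preU, preD
def cwrB_loop (line : List Int) (up dn sufU sufD : List Bool) (n : Int) :
    List Int → Bool → Bool → Bool × Option Int
  | [], _, _ => (false, none)
  | i :: rest, preU, preD =>
    let okU := preU && PySem.List.pyGetD sufU (min (i + 1) (n - 1)) true &&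
      (i == 0 || i == n - 1 ||
        decide (1 ≤ PySem.List.pyGetD line (i + 1) 0 - PySem.List.pyGetD line (i - 1) 0 ∧
                PySem.List.pyGetD line (i + 1) 0 - PySem.List.pyGetD line (i - 1) 0 ≤ 3))
    let okD := preD && PySem.List.pyGetD sufD (min (i + 1) (n - 1)) true &&
      (i == 0 || i == n - 1 ||
        decide (1 ≤ PySem.List.pyGetD line (i - 1) 0 - PySem.List.pyGetD line (i + 1) 0 ∧
                PySem.List.pyGetD line (i - 1) 0 - PySem.List.pyGetD line (i + 1) 0 ≤ 3))
    if okU || okD then (true, some i)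
    else if 1 ≤ i then
      cwrB_loop line up dn sufU sufD n rest
        (preU && PySem.List.pyGetD up (i - 1) true)
        (preD && PySem.List.pyGetD dn (i - 1) true)
    else
      cwrB_loop line up dn sufU sufD n rest preU preD

def count_with_remove_alt (line : List Int) : Bool × Option Int :=
  let n : Int := line.length
  -- [1 <= b - a <= 3 for a, b in zip(line, line[1:])]
  let up := (line.zip line.tail).map (fun ab => decide (1 ≤ ab.2 - ab.1 ∧ ab.2 - ab.1 ≤ 3))
  let dn := (line.zip line.tail).map (fun ab => decide (1 ≤ ab.1 - ab.2 ∧ ab.1 - ab.2 ≤ 3))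
  cwrB_loop line up dn (suffix_chain up) (suffix_chain dn) n
    (PySem.List.pyRange 0 n 1) true true

-- ===== PRECONDITION & SPEC =====
def Spec_count_with_remove (line : List Int) (out : Bool × Option Int) : Prop := out = count_with_remove_alt line
instance (line : List Int) (out : Bool × Option Int) : Decidable (Spec_count_with_remove line out) := by unfold Spec_count_with_remove; infer_instance

-- ===== CLAIM (what is proved, stated in full; the proofs are below) =====
def Claim_equal_count_with_remove : Prop := ∀ (line : List Int), Dom_count_with_remove line → Spec_count_with_remove line (count_with_remove line)


-- ===== LEMMAS AND PROOFS =====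

-- "ascending step" / "descending step" pair predicates
def upP (a b : Int) : Bool := decide (1 ≤ b - a ∧ b - a ≤ 3)
def dnP (a b : Int) : Bool := decide (1 ≤ a - b ∧ a - b ≤ 3)

-- structural "all adjacent pairs satisfy p"
def chainB (p : Int → Int → Bool) : List Int → Bool
  | [] => true
  | [_] => true
  | a :: b :: t => p a b && chainB p (b :: t)

def upL (line : List Int) : List Bool :=
  (line.zip line.tail).map (fun ab => decide (1 ≤ ab.2 - ab.1 ∧ ab.2 - ab.1 ≤ 3))
def dnL (line : List Int) : List Bool :=
  (line.zip line.tail).map (fun ab => decide (1 ≤ ab.1 - ab.2 ∧ ab.1 - ab.2 ≤ 3))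

lemma zipWith_eq_map_zip (f : Int → Int → Bool) (l l' : List Int) :
    List.zipWith f l l' = (l.zip l').map (fun ab => f ab.1 ab.2) := by
  induction l generalizing l' with
  | nil => simp
  | cons a t ih => cases l' <;> simp [ih]

lemma upL_eq : upL line = List.zipWith upP line line.tail := by
  rw [zipWith_eq_map_zip]; rfl
lemma dnL_eq : dnL line = List.zipWith dnP line line.tail := by
  rw [zipWith_eq_map_zip]; rfl

lemma pyAllIdx_eq_range (p : Int → Int → Bool) (l : List Int) :
    pyAllIdx p l = (List.range (l.length - 1)).all
      (fun k => p (l.getD k 0) (l.getD (k + 1) 0)) := by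
  unfold pyAllIdx
  rw [PySem.List.pyRange_one]
  have h : ((l.length : Int) - 1 - 0).toNat = l.length - 1 := by omega
  rw [h, List.all_map]
  refine List.all_congr rfl (fun k => ?_)
  simp only [Function.comp, zero_add]
  rw [show (k : Int) + 1 = ((k + 1 : Nat) : Int) from (by push_cast; ring)]
  simp only [PySem.List.pyGetD_natCast]

lemma pyAllIdx_eq_chainB (p : Int → Int → Bool) (l : List Int) :
    pyAllIdx p l = chainB p l := by
  rw [pyAllIdx_eq_range]
  induction l with
  | nil => rfl
  | cons a t ih =>
    cases t with
    | nil => rfl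
    | cons b t' =>
      have hlen : (a :: b :: t').length - 1 = ((b :: t').length - 1) + 1 := by
        simp
      rw [hlen, List.range_succ_eq_map, List.all_cons, List.all_map]
      show (p a b && _) = chainB p (a :: b :: t')
      rw [show chainB p (a :: b :: t') = (p a b && chainB p (b :: t')) from rfl, ← ih]
      congr 1

lemma chainB_and (p q : Int → Int → Bool) (l : List Int) :
    chainB (fun a b => p a b && q a b) l = (chainB p l && chainB q l) := by
  induction l with
  | nil => rfl
  | cons a t ih =>
    cases t with
    | nil => rfl
    | cons b t' =>
      show (p a b && q a b && chainB _ (b :: t')) = _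
      rw [ih, show chainB p (a :: b :: t') = (p a b && chainB p (b :: t')) from rfl,
        show chainB q (a :: b :: t') = (q a b && chainB q (b :: t')) from rfl]
      cases p a b <;> cases q a b <;> cases chainB p (b :: t') <;>
        cases chainB q (b :: t') <;> rfl

lemma chainB_congr {p q : Int → Int → Bool} (h : ∀ a b, p a b = q a b) (l : List Int) :
    chainB p l = chainB q l := by
  induction l with
  | nil => rfl
  | cons a t ih =>
    cases t with
    | nil => rfl
    | cons b t' => show (p a b && _) = (q a b && _); rw [h, ih]

lemma check_cond_eq (l : List Int) :
    (check_order l && check_diff l) = (chainB upP l || chainB dnP l) := by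
  unfold check_order check_diff
  rw [pyAllIdx_eq_chainB, pyAllIdx_eq_chainB, pyAllIdx_eq_chainB]
  have dist : ∀ x y z : Bool, ((x || y) && z) = (x && z || y && z) := by decide
  rw [dist]
  congr 1
  · rw [← chainB_and]
    apply chainB_congr
    intro a b
    unfold upP
    rw [← Bool.decide_and, decide_eq_decide]
    rcases abs_cases (a - b) with ⟨h1, h2⟩ | ⟨h1, h2⟩ <;> rw [h1] <;> omega
  · rw [← chainB_and]
    apply chainB_congr
    intro a b
    unfold dnP
    rw [← Bool.decide_and, decide_eq_decide]
    rcases abs_cases (a - b) with ⟨h1, h2⟩ | ⟨h1, h2⟩ <;> rw [h1] <;> omega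

def bridgeOf (p : Int → Int → Bool) (xs ys : List Int) : Bool :=
  match xs.getLast?, ys.head? with
  | some a, some b => p a b
  | _, _ => true

lemma chainB_append (p : Int → Int → Bool) (xs ys : List Int) :
    chainB p (xs ++ ys) = (chainB p xs && chainB p ys && bridgeOf p xs ys) := by
  induction xs with
  | nil =>
    cases ys with
    | nil => rfl
    | cons c ys' =>
      show chainB p (c :: ys') = (true && chainB p (c :: ys') && true)
      cases chainB p (c :: ys') <;> rfl
  | cons a t ih =>
    cases t with
    | nil =>
      cases ys with
      | nil => rfl
      | cons c ys' =>
        show chainB p (a :: c :: ys') = (true && chainB p (c :: ys') && p a c)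
        rw [show chainB p (a :: c :: ys') = (p a c && chainB p (c :: ys')) from rfl]
        cases p a c <;> cases chainB p (c :: ys') <;> rfl
    | cons b t' =>
      show (p a b && chainB p ((b :: t') ++ ys)) = _
      rw [ih, show chainB p (a :: b :: t') = (p a b && chainB p (b :: t')) from rfl]
      unfold bridgeOf
      rw [List.getLast?_cons_cons]
      cases p a b <;> cases chainB p (b :: t') <;> cases chainB p ys <;> simp

lemma chainB_eq_all_zipWith (p : Int → Int → Bool) (l : List Int) :
    chainB p l = (List.zipWith p l l.tail).all id := by
  induction l with
  | nil => rfl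
  | cons a t ih =>
    cases t with
    | nil => rfl
    | cons b t' =>
      show (p a b && chainB p (b :: t')) = _
      rw [ih]
      rfl

lemma chainB_short (p : Int → Int → Bool) (l : List Int) (h : l.length ≤ 1) :
    chainB p l = true := by
  cases l with
  | nil => rfl
  | cons a t => cases t with
    | nil => rfl
    | cons b t' => simp at h

-- the recursive characterisation of the suffix table
def suffixChainRec : List Bool → List Bool
  | [] => [true]
  | p :: t =>
    let s := suffixChainRec t
    (p && PySem.List.pyGetD s 0 true) :: s

lemma foldl_snoc_aux (l : List Bool) (v : Bool) (s : List Bool) :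
    l.foldl (fun s p => s ++ [PySem.List.pyGetD s (-1) true && p]) (s ++ [v]) =
      s ++ List.scanl (· && ·) v l := by
  induction l generalizing v s with
  | nil => simp
  | cons p t ih =>
    show t.foldl _ ((s ++ [v]) ++ [PySem.List.pyGetD (s ++ [v]) (-1) true && p]) = _
    rw [PySem.List.pyGetD_neg_one_append_singleton, ih]
    simp [List.scanl]

lemma foldl_and_eq_all (l : List Bool) (v : Bool) :
    l.foldl (· && ·) v = (v && l.all id) := by
  induction l generalizing v with
  | nil => simp
  | cons p t ih => simp [List.foldl_cons, ih, Bool.and_assoc]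

lemma scanl_and_append_singleton (l : List Bool) (v a : Bool) :
    List.scanl (· && ·) v (l ++ [a]) =
      List.scanl (· && ·) v l ++ [l.foldl (· && ·) v && a] := by
  induction l generalizing v with
  | nil => simp [List.scanl]
  | cons p t ih =>
    rw [List.cons_append, List.scanl_cons, ih, List.scanl_cons, List.foldl_cons]
    simp

lemma suffixChainRec_getD (pairs : List Bool) (k : Nat) (h : k ≤ pairs.length) :
    PySem.List.pyGetD (suffixChainRec pairs) (k : Int) true = (pairs.drop k).all id := by
  induction pairs generalizing k with
  | nil =>
    have : k = 0 := by simpa using h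
    subst this
    rfl
  | cons p t ih =>
    cases k with
    | zero =>
      show PySem.List.pyGetD ((p && _) :: suffixChainRec t) ((0 : Nat) : Int) true = _
      rw [show (((0 : Nat)) : Int) = (0 : Int) from rfl, PySem.List.pyGetD_zero_cons]
      have h0 := ih 0 (by omega)
      rw [show ((0 : Nat) : Int) = (0 : Int) from rfl] at h0
      simp only [List.drop_zero] at h0 ⊢
      rw [h0]
      simp
    | succ k' =>
      show PySem.List.pyGetD (_ :: suffixChainRec t) _ true = _
      rw [show ((k' + 1 : Nat) : Int) = (((k' + 1 : Nat)) : Int) from rfl,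
        PySem.List.pyGetD_natCast]
      simp only [List.getD_cons_succ, List.drop_succ_cons]
      rw [← PySem.List.pyGetD_natCast]
      exact ih k' (by simpa using h)

lemma suffix_chain_eq_rec (pairs : List Bool) :
    suffix_chain pairs = suffixChainRec pairs := by
  unfold suffix_chain
  rw [show ([true] : List Bool) = [] ++ [true] from rfl, foldl_snoc_aux, List.nil_append]
  induction pairs with
  | nil => rfl
  | cons p t ih =>
    rw [List.reverse_cons, scanl_and_append_singleton, List.reverse_append, ih]
    show (t.reverse.foldl (· && ·) true && p) :: suffixChainRec t = _
    show _ = (p && PySem.List.pyGetD (suffixChainRec t) 0 true) :: suffixChainRec t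
    congr 1
    rw [foldl_and_eq_all, List.all_reverse, Bool.true_and]
    have h0 := suffixChainRec_getD t 0 (by omega)
    rw [show ((0 : Nat) : Int) = (0 : Int) from rfl] at h0
    rw [h0, List.drop_zero, Bool.and_comm]

lemma suffix_chain_getD (pairs : List Bool) (k : Nat) (h : k ≤ pairs.length) :
    PySem.List.pyGetD (suffix_chain pairs) (k : Int) true = (pairs.drop k).all id := by
  rw [suffix_chain_eq_rec]
  exact suffixChainRec_getD pairs k h

lemma take_getLast? (l : List Int) (k : Nat) (h : k ≤ l.length) (hk : 0 < k) :
    (l.take k).getLast? = l[k - 1]? := by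
  rw [List.getLast?_eq_getElem?, List.length_take_of_le h, List.getElem?_take,
    if_pos (by omega)]

-- suffix factor: chain of line[k+1:] equals the suffix-table lookup B makes
lemma suffix_factor (p : Int → Int → Bool)
    (line : List Int) (pl : List Bool) (hpl : pl = List.zipWith p line line.tail)
    (k : Nat) (hk : k < line.length) :
    chainB p (line.drop (k + 1)) =
      PySem.List.pyGetD (suffix_chain pl) (min ((k : Int) + 1) ((line.length : Int) - 1)) true := by
  have hlen : pl.length = line.length - 1 := by
    subst hpl; simp
  have hm : min ((k : Int) + 1) ((line.length : Int) - 1)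
      = ((min (k + 1) (line.length - 1) : Nat) : Int) := by push_cast; omega
  rw [hm, suffix_chain_getD _ _ (by omega)]
  rw [chainB_eq_all_zipWith]
  have hdt : (line.drop (k + 1)).tail = line.tail.drop (k + 1) := by
    rw [List.tail_drop, List.drop_tail]
  rw [hdt, ← List.drop_zipWith, ← hpl]
  rcases Nat.lt_or_ge (k + 1) line.length with hlt | hge
  · have : min (k + 1) (line.length - 1) = k + 1 := by omega
    rw [this]
  · have h1 : pl.drop (k + 1) = [] := by
      apply List.drop_eq_nil_of_le; omega
    have h2 : pl.drop (min (k + 1) (line.length - 1)) = [] := by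
      apply List.drop_eq_nil_of_le; omega
    rw [h1, h2]

lemma pyGetD_cast_pred (line : List Int) (k : Nat) (hpos : 0 < k) :
    PySem.List.pyGetD line ((k : Int) - 1) 0 = line.getD (k - 1) 0 := by
  rw [show (k : Int) - 1 = ((k - 1 : Nat) : Int) from (by omega),
    PySem.List.pyGetD_natCast]

lemma pyGetD_cast_succ (line : List Int) (k : Nat) :
    PySem.List.pyGetD line ((k : Int) + 1) 0 = line.getD (k + 1) 0 := by
  rw [show (k : Int) + 1 = ((k + 1 : Nat) : Int) from (by push_cast; ring),
    PySem.List.pyGetD_natCast]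

-- bridge factor
lemma bridge_factor (p : Int → Int → Bool) (line : List Int) (k : Nat) (hk : k < line.length) :
    bridgeOf p (line.take k) (line.drop (k + 1)) =
      (((k : Int) == 0) || ((k : Int) == (line.length : Int) - 1) ||
        p (PySem.List.pyGetD line ((k : Int) - 1) 0) (PySem.List.pyGetD line ((k : Int) + 1) 0)) := by
  rcases Nat.eq_zero_or_pos k with h0 | hpos
  · subst h0
    show bridgeOf p [] _ = _
    unfold bridgeOf
    rfl
  rcases Nat.lt_or_ge (k + 1) line.length with hlt | hge
  · -- interior: 0 < k < len - 1
    have e1 : ((k : Int) == 0) = false := by simp; omega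
    have e2 : ((k : Int) == (line.length : Int) - 1) = false := by simp; omega
    rw [e1, e2]
    unfold bridgeOf
    rw [take_getLast? line k (by omega) hpos, List.head?_drop]
    rw [List.getElem?_eq_getElem (show k - 1 < line.length by omega),
      List.getElem?_eq_getElem (show k + 1 < line.length by omega)]
    rw [pyGetD_cast_pred line k hpos, pyGetD_cast_succ line k,
      List.getD_eq_getElem _ _ (show k - 1 < line.length by omega),
      List.getD_eq_getElem _ _ (show k + 1 < line.length by omega)]
    rfl
  · -- k = len - 1 : right part empty
    have hnil : line.drop (k + 1) = [] := by apply List.drop_eq_nil_of_le; omega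
    rw [hnil]
    have e2 : ((k : Int) == (line.length : Int) - 1) = true := by simp; omega
    rw [e2]
    unfold bridgeOf
    rcases hl : (line.take k).getLast? with _ | a
    · simp
    · simp

-- one removal's validity: A's check on line with index k popped = B's O(1) test
lemma cond_eq (line : List Int) (k : Nat) (hk : k < line.length) (p : Int → Int → Bool)
    (pl : List Bool) (hpl : pl = List.zipWith p line line.tail) :
    chainB p (line.eraseIdx k) =
      (chainB p (line.take k) &&
       PySem.List.pyGetD (suffix_chain pl) (min ((k : Int) + 1) ((line.length : Int) - 1)) true &&
       (((k : Int) == 0) || ((k : Int) == (line.length : Int) - 1) ||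
         p (PySem.List.pyGetD line ((k : Int) - 1) 0) (PySem.List.pyGetD line ((k : Int) + 1) 0))) := by
  rw [List.eraseIdx_eq_take_drop_succ, chainB_append,
    suffix_factor p line pl hpl k hk, ← bridge_factor p line k hk]

-- prefix-flag update: chain of line[:k+1] from chain of line[:k]
lemma chainB_snoc (p : Int → Int → Bool) (xs : List Int) (y : Int) :
    chainB p (xs ++ [y]) =
      (chainB p xs && (match xs.getLast? with | some a => p a y | none => true)) := by
  rw [chainB_append]
  unfold bridgeOf
  cases xs.getLast? <;> cases chainB p xs <;> rfl

lemma chain_take_succ (p : Int → Int → Bool) (line : List Int)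
    (pl : List Bool) (hpl : pl = List.zipWith p line line.tail)
    (k : Nat) (hk : k < line.length) (hpos : 0 < k) :
    chainB p (line.take (k + 1)) =
      (chainB p (line.take k) && PySem.List.pyGetD pl ((k : Int) - 1) true) := by
  have hlen : pl.length = line.length - 1 := by subst hpl; simp
  rw [List.take_add_one, List.getElem?_eq_getElem hk, Option.toList_some, chainB_snoc]
  congr 1
  rw [take_getLast? line k (by omega) hpos,
    List.getElem?_eq_getElem (show k - 1 < line.length by omega)]
  rw [show (k : Int) - 1 = ((k - 1 : Nat) : Int) from (by omega),
    PySem.List.pyGetD_natCast, hpl,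
    List.getD_eq_getElem _ _ (show k - 1 < (List.zipWith p line line.tail).length by
      rw [← hpl]; omega),
    List.getElem_zipWith]
  have hkk : k - 1 + 1 = k := by omega
  simp [List.getElem_tail, hkk]

-- the two loops agree from any start index, with B's state = prefix chains
lemma loop_eq (line : List Int) (k : Nat) (hk : k ≤ line.length) :
    cwrA_go line (PySem.List.pyRange (k : Int) (line.length : Int) 1) =
      cwrB_loop line (upL line) (dnL line) (suffix_chain (upL line)) (suffix_chain (dnL line))
        (line.length : Int) (PySem.List.pyRange (k : Int) (line.length : Int) 1)
        (chainB upP (line.take k)) (chainB dnP (line.take k)) := by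
  induction h : line.length - k generalizing k with
  | zero =>
    have : k = line.length := by omega
    subst this
    rw [PySem.List.pyRange_one_eq_nil (by omega)]
    rfl
  | succ m ih =>
    have hklt : k < line.length := by omega
    rw [PySem.List.pyRange_one_cons (by exact_mod_cast hklt)]
    show (match PySem.List.pop? line (k : Int) with
      | some (_, r) =>
          if check_order r && check_diff r then (true, some (k : Int))
          else cwrA_go line (PySem.List.pyRange ((k : Int) + 1) (line.length : Int) 1)
      | none => cwrA_go line (PySem.List.pyRange ((k : Int) + 1) (line.length : Int) 1)) = _
    rw [PySem.List.pop?_natCast line k hklt]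
    have hcond : (check_order (line.eraseIdx k) && check_diff (line.eraseIdx k)) =
        ((chainB upP (line.take k) &&
          PySem.List.pyGetD (suffix_chain (upL line)) (min ((k : Int) + 1) ((line.length : Int) - 1)) true &&
          (((k : Int) == 0) || ((k : Int) == (line.length : Int) - 1) ||
            upP (PySem.List.pyGetD line ((k : Int) - 1) 0) (PySem.List.pyGetD line ((k : Int) + 1) 0))) ||
         (chainB dnP (line.take k) &&
          PySem.List.pyGetD (suffix_chain (dnL line)) (min ((k : Int) + 1) ((line.length : Int) - 1)) true &&
          (((k : Int) == 0) || ((k : Int) == (line.length : Int) - 1) ||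
            dnP (PySem.List.pyGetD line ((k : Int) - 1) 0) (PySem.List.pyGetD line ((k : Int) + 1) 0)))) := by
      rw [check_cond_eq, cond_eq line k hklt upP (upL line) (upL_eq),
        cond_eq line k hklt dnP (dnL line) (dnL_eq)]
    show (if (check_order (line.eraseIdx k) && check_diff (line.eraseIdx k)) = true
        then ((true, some (k : Int)) : Bool × Option Int)
        else cwrA_go line (PySem.List.pyRange ((k : Int) + 1) (line.length : Int) 1)) = _
    simp only [hcond]
    rw [cwrB_loop]
    simp only [upP, dnP]
    split_ifs with hc hk1
    · rfl
    · -- removal at k not valid; k ≥ 1: update the prefix flags and recurse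
      have hpos : 0 < k := by
        rcases Nat.eq_zero_or_pos k with h0 | hpos
        · exfalso; apply absurd hk1; subst h0; norm_num
        · exact hpos
      have hcast : ((k : Int) + 1) = ((k + 1 : Nat) : Int) := by push_cast; ring
      rw [hcast]
      have hih := ih (k + 1) (by omega) (by omega)
      rw [chain_take_succ upP line (upL line) upL_eq k hklt hpos,
        chain_take_succ dnP line (dnL line) dnL_eq k hklt hpos] at hih
      exact hih
    · -- removal at k not valid; k = 0: prefix flags stay true
      have h0 : k = 0 := by
        by_contra hne
        exact hk1 (by exact_mod_cast Nat.one_le_iff_ne_zero.mpr hne)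
      subst h0
      have hcast : ((0 : Nat) : Int) + 1 = ((1 : Nat) : Int) := by norm_num
      rw [hcast]
      have hih := ih 1 (by omega) (by omega)
      rw [chainB_short upP _ (by simp), chainB_short dnP _ (by simp)] at hih ⊢
      exact hih

-- ===== VERDICT (by name: the statement is the Claim_ definition above) =====
theorem count_with_remove_spec : Claim_equal_count_with_remove := by
  intro line _
  unfold Spec_count_with_remove count_with_remove count_with_remove_alt
  have h := loop_eq line 0 (by omega)
  simpa [upL, dnL, chainB] using h
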